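-- pv_equiv track=rewrite | github.com/Priyeshpandey/local_rep | ZCO15004.py | get_left_bound_array
-- ===== SOURCE A (Python) =====
-- def get_left_bound_array(arr, n):   #O(max_stack_len*n) ~ O(n)ish
--     bound = [(0, -1)]
--     stack = []
--     stack_len = 0
--     for i in range(n):
--         if stack_len > 0:
--             while stack_len > 0 and stack[-1][1] >= arr[i][1]:
--                 stack.pop()
--                 stack_len -= 1
--             bound.append(stack[-1] if stack_len > 0 else (0, -1))
--         stack.append(arr[i])
--         stack_len += 1
--     return bound
-- ===== SOURCE B (Python) =====
-- def get_left_bound_array(arr, n):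
--     # Link-chasing nearest-smaller-to-left: `left[i]` holds the index of the
--     # nearest j < i with arr[j][1] < arr[i][1] (or -1); each query chases the
--     # precomputed links instead of popping an explicit stack.
--     bound = [(0, -1)]
--     left = [-1] * n
--     for i in range(n):
--         j = i - 1
--         while j >= 0 and arr[j][1] >= arr[i][1]:
--             j = left[j]
--         left[i] = j
--         if i > 0:
--             bound.append(arr[j] if j >= 0 else (0, -1))
--     return bound
-- ===== Notes on version B (the rewrite author's own statement) =====
-- stated objective: alternative
-- what changed: Replaces the explicit push/pop monotonic stack (plus a hand-maintained stack_len counter) by a predecessor-link array left[] whose links are chased (j = left[j]) to find the nearest smaller element, changing the maintained data structure and traversal while staying amortized O(n).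
import Mathlib
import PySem

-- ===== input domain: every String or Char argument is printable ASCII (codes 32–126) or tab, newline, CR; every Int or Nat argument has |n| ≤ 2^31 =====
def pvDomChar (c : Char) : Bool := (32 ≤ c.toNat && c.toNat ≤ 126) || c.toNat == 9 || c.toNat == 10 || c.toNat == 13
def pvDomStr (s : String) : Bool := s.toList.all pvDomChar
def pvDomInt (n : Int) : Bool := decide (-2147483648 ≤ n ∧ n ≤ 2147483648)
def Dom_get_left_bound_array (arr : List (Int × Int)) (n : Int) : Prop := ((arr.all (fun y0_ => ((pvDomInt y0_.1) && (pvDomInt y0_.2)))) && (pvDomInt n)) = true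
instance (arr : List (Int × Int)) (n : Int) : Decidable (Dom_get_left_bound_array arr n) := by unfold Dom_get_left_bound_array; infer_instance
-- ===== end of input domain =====

-- B replaces A's explicit monotonic push/pop stack by a predecessor-link array chased per query
-- (same amortized O(n) cost; objective: alternative data structure / traversal).

-- ===== PORT A =====
-- The Python stack is represented head-first: head = Python's stack[-1], pop = drop the head.
-- while stack_len > 0 and stack[-1][1] >= v: stack.pop(); stack_len -= 1
def pvPopA (v : Int) : List (Int × Int) → Int → List (Int × Int) × Int
  | [], len => ([], len)
  | t :: rest, len =>
    if len > 0 ∧ t.2 ≥ v then pvPopA v rest (len - 1) else (t :: rest, len)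

-- one iteration of A's `for i in range(n)` body over the state (bound, stack, stack_len)
def pvStepA (arr : List (Int × Int)) (st : List (Int × Int) × List (Int × Int) × Int) (i : Int) :
    List (Int × Int) × List (Int × Int) × Int :=
  match PySem.List.pyGet? arr i with
  | none => st   -- Python raises IndexError here; such inputs are excluded by Pre_
  | some ai =>
    if st.2.2 > 0 then
      let p := pvPopA ai.2 st.2.1 st.2.2
      (st.1 ++ [if p.2 > 0 then p.1.headD (0, -1) else (0, -1)], ai :: p.1, p.2 + 1)
    else (st.1, ai :: st.2.1, st.2.2 + 1)

def get_left_bound_array (arr : List (Int × Int)) (n : Int) : List (Int × Int) :=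
  ((PySem.List.pyRange 0 n 1).foldl (pvStepA arr) ([(0, -1)], [], 0)).1

-- ===== PORT B =====
-- the link-chasing while loop `while j >= 0 and arr[j][1] >= arr[i][1]: j = left[j]`;
-- the fuel `i.toNat` is a totality guard only: the links satisfy left[j] < j, so the
-- chase from j = i-1 reaches -1 after at most i steps.
def pvChase (arr : List (Int × Int)) (left : List Int) (v : Int) : Nat → Int → Int
  | 0, j => j
  | fuel + 1, j =>
    if 0 ≤ j then
      match PySem.List.pyGet? arr j with
      | none => j   -- Python raises IndexError here; excluded by Pre_
      | some aj =>
        if aj.2 ≥ v then pvChase arr left v fuel (PySem.List.pyGetD left j (-1)) else j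
    else j

-- one iteration of B's loop body over the state (bound, left)
def pvStepB (arr : List (Int × Int)) (st : List (Int × Int) × List Int) (i : Int) :
    List (Int × Int) × List Int :=
  match PySem.List.pyGet? arr i with
  | none => st   -- Python raises IndexError here; excluded by Pre_
  | some ai =>
    let j := pvChase arr st.2 ai.2 i.toNat (i - 1)
    (if i > 0 then
       st.1 ++ [if 0 ≤ j then (PySem.List.pyGet? arr j).getD (0, -1) else (0, -1)]
     else st.1,
     PySem.List.pySetD st.2 i j)

def get_left_bound_array_alt (arr : List (Int × Int)) (n : Int) : List (Int × Int) :=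
  ((PySem.List.pyRange 0 n 1).foldl (pvStepB arr) ([(0, -1)], List.replicate n.toNat (-1))).1

-- ===== PRECONDITION & SPEC =====
-- Pre_ excludes exactly the inputs where the Python A raises IndexError (n exceeds len(arr));
-- B raises there too.
def Pre_get_left_bound_array (arr : List (Int × Int)) (n : Int) : Prop := n ≤ (arr.length : Int)
instance (arr : List (Int × Int)) (n : Int) : Decidable (Pre_get_left_bound_array arr n) := by unfold Pre_get_left_bound_array; infer_instance

def pvWitness_get_left_bound_array : (List (Int × Int)) × Int := ([(1, 2), (3, 1), (5, 4)], 3)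

def Spec_get_left_bound_array (arr : List (Int × Int)) (n : Int) (out : List (Int × Int)) : Prop := out = get_left_bound_array_alt arr n
instance (arr : List (Int × Int)) (n : Int) (out : List (Int × Int)) : Decidable (Spec_get_left_bound_array arr n out) := by unfold Spec_get_left_bound_array; infer_instance

-- ===== CLAIM (what is proved, stated in full; the proofs are below) =====
def Claim_equal_get_left_bound_array : Prop := ∀ (arr : List (Int × Int)) (n : Int), Dom_get_left_bound_array arr n → Pre_get_left_bound_array arr n → Spec_get_left_bound_array arr n (get_left_bound_array arr n)

-- ===== LEMMAS AND PROOFS =====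

-- value of arr at an Int index, with a throwaway default (all uses are in range)
def pvG (arr : List (Int × Int)) (k : Int) : Int × Int := (PySem.List.pyGet? arr k).getD (0, -1)

-- the chain of predecessor links starting at j (fuel-bounded)
def pvChain (left : List Int) : Nat → Int → List Int
  | 0, _ => []
  | fuel + 1, j =>
    if 0 ≤ j then j :: pvChain left fuel (PySem.List.pyGetD left j (-1)) else []

-- links established so far are valid: -1 ≤ left[k] < k for k < m
def pvChainOK (left : List Int) (m : Nat) : Prop :=
  ∀ k : Nat, k < m → -1 ≤ left.getD k (-1) ∧ left.getD k (-1) < (k : Int)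

lemma pvChase_bounds (arr : List (Int × Int)) (left : List Int) (v : Int) (m : Nat)
    (hok : pvChainOK left m) :
    ∀ (fuel : Nat) (j : Int), -1 ≤ j → j < (m : Int) →
      -1 ≤ pvChase arr left v fuel j ∧ pvChase arr left v fuel j ≤ j := by
  intro fuel
  induction fuel with
  | zero => intro j h1 _; exact ⟨h1, le_refl j⟩
  | succ fuel ih =>
    intro j h1 h2
    by_cases hj : 0 ≤ j
    · have hk : j.toNat < m := by omega
      have hok' := hok j.toNat hk
      rw [Int.toNat_of_nonneg hj] at hok'
      simp only [pvChase, if_pos hj]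
      cases hget : PySem.List.pyGet? arr j with
      | none => exact ⟨h1, le_refl j⟩
      | some aj =>
        by_cases hv : aj.2 ≥ v
        · simp only [if_pos hv]
          rw [PySem.List.pyGetD_of_nonneg left (-1) hj]
          have := ih (left.getD j.toNat (-1)) (by omega) (by omega)
          exact ⟨this.1, by omega⟩
        · simp only [if_neg hv]; exact ⟨h1, le_refl j⟩
    · simp only [pvChase, if_neg hj]; exact ⟨h1, le_refl j⟩


lemma pvChain_fuel_irrel (left : List Int) (m : Nat) (hok : pvChainOK left m) :
    ∀ (f1 : Nat) (j : Int) (f2 : Nat), -1 ≤ j → j < (m : Int) →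
      (j + 1).toNat ≤ f1 → (j + 1).toNat ≤ f2 →
      pvChain left f1 j = pvChain left f2 j := by
  intro f1
  induction f1 with
  | zero =>
    intro j f2 h1 h2 hf1 hf2
    have hj : j < 0 := by omega
    cases f2 with
    | zero => rfl
    | succ f2 => simp [pvChain, show ¬ (0:Int) ≤ j by omega]
  | succ f1 ih =>
    intro j f2 h1 h2 hf1 hf2
    by_cases hj : 0 ≤ j
    · have hf2' : ∃ f2', f2 = f2' + 1 := by cases f2 with | zero => omega | succ k => exact ⟨k, rfl⟩
      obtain ⟨f2', rfl⟩ := hf2'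
      have hok' := hok j.toNat (by omega)
      rw [Int.toNat_of_nonneg hj] at hok'
      simp only [pvChain, if_pos hj]
      rw [PySem.List.pyGetD_of_nonneg left (-1) hj]
      congr 1
      exact ih (left.getD j.toNat (-1)) f2' (by omega) (by omega) (by omega) (by omega)
    · cases f2 with
      | zero => simp [pvChain, hj]
      | succ f2' => simp [pvChain, hj]


lemma pvChain_set_high (left : List Int) (m : Nat) (v' : Int) (hok : pvChainOK left m) :
    ∀ (fuel : Nat) (j : Int), j < (m : Int) →
      pvChain (left.set m v') fuel j = pvChain left fuel j := by
  intro fuel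
  induction fuel with
  | zero => intro j _; rfl
  | succ fuel ih =>
    intro j hj
    by_cases h0 : 0 ≤ j
    · have hk : j.toNat < m := by omega
      have hok' := hok j.toNat hk
      rw [Int.toNat_of_nonneg h0] at hok'
      simp only [pvChain, if_pos h0]
      rw [PySem.List.pyGetD_of_nonneg _ (-1) h0, PySem.List.pyGetD_of_nonneg _ (-1) h0]
      have hset : (left.set m v').getD j.toNat (-1) = left.getD j.toNat (-1) := by
        simp [List.getD, List.getElem?_set_ne (by omega : m ≠ j.toNat)]
      rw [hset]
      congr 1
      exact ih (left.getD j.toNat (-1)) (by omega)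
    · simp [pvChain, h0]


lemma pvPop_chase (arr : List (Int × Int)) (left : List Int) (v : Int) (m : Nat)
    (hm : m ≤ arr.length) (hok : pvChainOK left m) :
    ∀ (fuel : Nat) (j : Int), -1 ≤ j → j < (m : Int) → (j + 1).toNat ≤ fuel →
      pvPopA v ((pvChain left fuel j).map (pvG arr)) ((pvChain left fuel j).length : Int)
        = ((pvChain left fuel (pvChase arr left v fuel j)).map (pvG arr),
           ((pvChain left fuel (pvChase arr left v fuel j)).length : Int)) := by
  intro fuel
  induction fuel with
  | zero => intro j h1 h2 hf; simp [pvChain, pvPopA]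
  | succ fuel ih =>
    intro j h1 h2 hf
    by_cases hj : 0 ≤ j
    · have hk : j.toNat < m := by omega
      have hok' := hok j.toNat hk
      rw [Int.toNat_of_nonneg hj] at hok'
      have hget : PySem.List.pyGet? arr j = some arr[j.toNat] :=
        PySem.List.pyGet?_eq_some_getElem arr (by omega) (by omega)
      have hg : pvG arr j = arr[j.toNat] := by simp [pvG, hget]
      have hchain : pvChain left (fuel + 1) j
          = j :: pvChain left fuel (left.getD j.toNat (-1)) := by
        rw [pvChain, if_pos hj, PySem.List.pyGetD_of_nonneg left (-1) hj]
      set j1 := left.getD j.toNat (-1) with hj1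
      by_cases hv : arr[j.toNat].2 ≥ v
      · have hchase : pvChase arr left v (fuel + 1) j = pvChase arr left v fuel j1 := by
          rw [pvChase, if_pos hj, hget]
          simp only [if_pos hv, hj1, PySem.List.pyGetD_of_nonneg left (-1) hj]
        have hcb := pvChase_bounds arr left v m hok fuel j1 (by omega) (by omega)
        have hre : pvChain left (fuel + 1) (pvChase arr left v fuel j1)
            = pvChain left fuel (pvChase arr left v fuel j1) :=
          pvChain_fuel_irrel left m hok (fuel + 1) _ fuel hcb.1 (by omega) (by omega) (by omega)
        rw [hchase, hchain, hre, List.map_cons, List.length_cons, pvPopA]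
        rw [if_pos ⟨by positivity, by rw [hg]; exact hv⟩]
        rw [show ((((pvChain left fuel j1).length + 1 : Nat) : Int) - 1) = ((pvChain left fuel j1).length : Int) by push_cast; ring]
        exact ih j1 (by omega) (by omega) (by omega)
      · have hchase : pvChase arr left v (fuel + 1) j = j := by
          rw [pvChase, if_pos hj, hget]
          simp only [if_neg hv]
        rw [hchase, hchain, List.map_cons, List.length_cons, pvPopA]
        rw [if_neg (by rw [hg]; intro h; exact hv h.2)]
    · have hchain : pvChain left (fuel + 1) j = [] := by rw [pvChain, if_neg hj]
      have hchase : pvChase arr left v (fuel + 1) j = j := by rw [pvChase, if_neg hj]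
      rw [hchase, hchain]
      simp [pvPopA]


lemma pvMain (arr : List (Int × Int)) (N : Nat) (hN : N ≤ arr.length) :
    ∀ m : Nat, m ≤ N →
      (((PySem.List.pyRange 0 (m : Int) 1).foldl (pvStepA arr) ([(0, -1)], [], 0)).1
          = ((PySem.List.pyRange 0 (m : Int) 1).foldl (pvStepB arr) ([(0, -1)], List.replicate N (-1))).1)
      ∧ (((PySem.List.pyRange 0 (m : Int) 1).foldl (pvStepA arr) ([(0, -1)], [], 0)).2.1
          = (pvChain ((PySem.List.pyRange 0 (m : Int) 1).foldl (pvStepB arr) ([(0, -1)], List.replicate N (-1))).2 m ((m : Int) - 1)).map (pvG arr))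
      ∧ (((PySem.List.pyRange 0 (m : Int) 1).foldl (pvStepA arr) ([(0, -1)], [], 0)).2.2
          = ((pvChain ((PySem.List.pyRange 0 (m : Int) 1).foldl (pvStepB arr) ([(0, -1)], List.replicate N (-1))).2 m ((m : Int) - 1)).length : Int))
      ∧ (((PySem.List.pyRange 0 (m : Int) 1).foldl (pvStepB arr) ([(0, -1)], List.replicate N (-1))).2.length = N)
      ∧ pvChainOK ((PySem.List.pyRange 0 (m : Int) 1).foldl (pvStepB arr) ([(0, -1)], List.replicate N (-1))).2 m := by
  intro m
  induction m with
  | zero =>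
    intro _
    simp [PySem.List.pyRange_one_eq_nil (by omega : (0:Int) ≤ 0), pvChain, pvChainOK]
  | succ m ih =>
    intro hm
    obtain ⟨h1, h2, h3, h4, h5⟩ := ih (by omega)
    have hrange : PySem.List.pyRange 0 ((m + 1 : Nat) : Int) 1
        = PySem.List.pyRange 0 (m : Int) 1 ++ [(m : Int)] := by
      rw [show ((m + 1 : Nat) : Int) = (m : Int) + 1 by push_cast; ring]
      exact PySem.List.pyRange_one_succ_right (by omega)
    set A := (PySem.List.pyRange 0 (m : Int) 1).foldl (pvStepA arr) ([(0, -1)], [], 0) with hA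
    set B := (PySem.List.pyRange 0 (m : Int) 1).foldl (pvStepB arr) ([(0, -1)], List.replicate N (-1)) with hB
    rw [hrange]
    simp only [List.foldl_append, List.foldl_cons, List.foldl_nil]
    rw [← hA, ← hB]
    have hget : PySem.List.pyGet? arr (m : Int) = some arr[m] := by
      have h := PySem.List.pyGet?_eq_some_getElem arr (show (0:Int) ≤ (m:Int) by omega)
        (show (m:Int) < (arr.length : Int) by omega)
      simp only [Int.toNat_natCast] at h
      exact h
    set a := arr[m] with ha
    have htn : ((m : Int)).toNat = m := by omega
    -- the chase performed by step B
    set j' := pvChase arr B.2 a.2 m ((m : Int) - 1) with hj'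
    have hcb : -1 ≤ j' ∧ j' ≤ (m : Int) - 1 :=
      pvChase_bounds arr B.2 a.2 m h5 m ((m : Int) - 1) (by omega) (by omega)
    have hstepB : pvStepB arr B (m : Int)
        = (if (m : Int) > 0 then
             B.1 ++ [if 0 ≤ j' then (PySem.List.pyGet? arr j').getD (0, -1) else (0, -1)]
           else B.1,
           B.2.set m j') := by
      rw [pvStepB, hget]
      simp only [htn, ← hj']
      rw [PySem.List.pySetD_of_nonneg _ _ (by omega : (0:Int) ≤ (m:Int)), htn]
    have hleft' : (B.2.set m j').length = N := by simp [h4]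
    have hgetset : (B.2.set m j').getD m (-1) = j' := by
      simp [List.getD, List.getElem?_set_self (by omega : m < B.2.length)]
    have hokset : pvChainOK (B.2.set m j') (m + 1) := by
      intro k hk
      by_cases hkm : k = m
      · subst hkm; rw [hgetset]; exact ⟨hcb.1, by omega⟩
      · have : (B.2.set m j').getD k (-1) = B.2.getD k (-1) := by
          simp [List.getD, List.getElem?_set_ne (by omega : m ≠ k)]
        rw [this]
        exact h5 k (by omega)
    have hchain' : pvChain (B.2.set m j') (m + 1) (((m + 1 : Nat) : Int) - 1)
        = (m : Int) :: pvChain B.2 m j' := by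
      rw [show (((m + 1 : Nat) : Int) - 1) = (m : Int) by push_cast; ring]
      rw [pvChain, if_pos (by omega : (0:Int) ≤ (m:Int))]
      rw [PySem.List.pyGetD_of_nonneg _ _ (by omega : (0:Int) ≤ (m:Int)), htn, hgetset]
      rw [pvChain_set_high B.2 m j' h5 m j' (by omega)]
    by_cases hm0 : m = 0
    · -- first iteration: A's stack is empty, B appends nothing
      subst hm0
      have hj0 : j' = -1 := by rw [hj']; norm_num [pvChase]
      have hstack : A.2.1 = [] := by rw [h2]; simp [pvChain]
      have hlen : A.2.2 = 0 := by rw [h3]; simp [pvChain]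
      have hstepA : pvStepA arr A 0 = (A.1, a :: A.2.1, A.2.2 + 1) := by
        rw [pvStepA]
        simp only [Nat.cast_zero] at hget
        rw [hget, hlen]
        norm_num
      have hchain0 : pvChain (B.2.set 0 j') (0 + 1) (((0 + 1 : Nat) : Int) - 1) = [0] := by
        norm_num [pvChain, PySem.List.pyGetD_of_nonneg]
      simp only [Nat.cast_zero] at hstepA hstepB ⊢
      rw [hstepA, hstepB]
      simp only [gt_iff_lt, lt_irrefl, if_false]
      refine ⟨h1, ?_, ?_, by simp [hleft'], by simpa using hokset⟩
      · rw [hstack]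
        
        rw [hchain0]
        simp only [Nat.cast_zero] at hget
        simp [pvG, hget, ha]
      · rw [hlen]
        
        rw [hchain0]
        simp
    · -- m ≥ 1: A's stack is nonempty and its pops mirror B's link chase
      have hm1 : 1 ≤ m := by omega
      have hcm : pvChain B.2 m ((m : Int) - 1)
          = ((m : Int) - 1) :: pvChain B.2 (m - 1) (PySem.List.pyGetD B.2 ((m : Int) - 1) (-1)) := by
        obtain ⟨m', rfl⟩ : ∃ m', m = m' + 1 := ⟨m - 1, by omega⟩
        rw [pvChain, if_pos (by omega : (0:Int) ≤ ((m' + 1 : Nat) : Int) - 1)]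
        simp
      have hlenpos : A.2.2 > 0 := by rw [h3, hcm]; simp
      have hpop := pvPop_chase arr B.2 a.2 m (by omega) h5 m ((m : Int) - 1) (by omega) (by omega)
        (by omega)
      have helem : (if ((pvChain B.2 m j').length : Int) > 0
            then ((pvChain B.2 m j').map (pvG arr)).headD (0, -1) else (0, -1))
          = (if 0 ≤ j' then pvG arr j' else (0, -1)) := by
        obtain ⟨f', hf'⟩ : ∃ f', m = f' + 1 := ⟨m - 1, by omega⟩
        by_cases hjpos : 0 ≤ j'
        · rw [hf', pvChain, if_pos hjpos]
          simp [hjpos]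
        · rw [hf', pvChain, if_neg hjpos]
          simp [hjpos]
      have hstepA : pvStepA arr A (m : Int)
          = (A.1 ++ [if 0 ≤ j' then pvG arr j' else (0, -1)],
             a :: (pvChain B.2 m j').map (pvG arr),
             ((pvChain B.2 m j').length : Int) + 1) := by
        rw [pvStepA, hget]
        simp only [if_pos hlenpos]
        rw [h2, h3, hpop, ← hj', helem]
      rw [hstepA, hstepB]
      refine ⟨?_, ?_, ?_, by simp [hleft'], by simpa using hokset⟩
      · rw [h1, if_pos (by omega : (m : Int) > 0)]
        by_cases hjpos : 0 ≤ j' <;> simp [hjpos, pvG]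
      · rw [hchain']
        simp [pvG, hget, ha]
      · rw [hchain']
        simp

lemma pvFinal (arr : List (Int × Int)) (n : Int) (hpre : n ≤ (arr.length : Int)) :
    get_left_bound_array arr n = get_left_bound_array_alt arr n := by
  unfold get_left_bound_array get_left_bound_array_alt
  by_cases hn : 0 ≤ n
  · have hNlen : n.toNat ≤ arr.length := by omega
    have hcast : ((n.toNat : Nat) : Int) = n := Int.toNat_of_nonneg hn
    have := (pvMain arr n.toNat hNlen n.toNat le_rfl).1
    rwa [hcast] at this
  · rw [PySem.List.pyRange_one_eq_nil (by omega)]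
    rfl

-- ===== VERDICT (by name: the statement is the Claim_ definition above) =====
theorem get_left_bound_array_spec : Claim_equal_get_left_bound_array := by
  intro arr n _ hpre
  exact pvFinal arr n hpre
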